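-- pv_equiv track=rewrite | github.com/y2sec/Algorithm | Programmers/80.py | find
-- ===== SOURCE A (Python) =====
-- def find(s):
--     count = 0
--
--     leftStack = list(s)
--     rightStack = list()
--
--     while leftStack:
--         value = leftStack.pop()
--
--         if value == '0' and leftStack[-2:] == ['1', '1']:
--             leftStack.pop()
--             leftStack.pop()
--             count += 1
--             cnt = 0
--             while rightStack and cnt < 2:
--                 leftStack.append(rightStack.pop())
--                 cnt += 1
--         else:
--             rightStack.append(value)
--
--     s = ''.join(rightStack[-1::-1])
--
--     m = '110' * count
--     if s == '1':
--         s = m + s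
--     elif s.find('11') != -1:
--         i = s.find('11')
--         s = s[:i] + m + s[i:]
--     else:
--         i = s.rfind('0')
--         s = s[:i+1] + m + s[i+1:]
--
--     return s
-- ===== SOURCE B (Python) =====
-- def find(s):
--     # Forward single-pass stack reduction (A scans backwards with two stacks),
--     # then one scan computes the insertion position directly (first '11', else
--     # just after the last '0', else 0) instead of find/rfind plus a special case.
--     stack = []
--     count = 0
--     for ch in s:
--         stack.append(ch)
--         if stack[-3:] == ['1', '1', '0']:
--             del stack[-3:]
--             count += 1
--     t = ''.join(stack)
--
--     i = -1
--     last0 = -1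
--     for j in range(len(t)):
--         if t[j] == '1' and j + 1 < len(t) and t[j + 1] == '1':
--             i = j
--             break
--         if t[j] == '0':
--             last0 = j
--     if i == -1:
--         i = last0 + 1
--     return t[:i] + '110' * count + t[i:]
-- ===== Notes on version B (the rewrite author's own statement) =====
-- stated objective: idiomatic
-- what changed: Replaced A's backward two-stack reduction with the standard forward single-pass stack that deletes the target triple as soon as it completes on top, and replaced the three-branch find/rfind reinsertion (with its redundant one-character special case) by a single direct scan that computes the insertion index (first double-one pair, else just after the last zero, else the front).
import Mathlib
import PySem

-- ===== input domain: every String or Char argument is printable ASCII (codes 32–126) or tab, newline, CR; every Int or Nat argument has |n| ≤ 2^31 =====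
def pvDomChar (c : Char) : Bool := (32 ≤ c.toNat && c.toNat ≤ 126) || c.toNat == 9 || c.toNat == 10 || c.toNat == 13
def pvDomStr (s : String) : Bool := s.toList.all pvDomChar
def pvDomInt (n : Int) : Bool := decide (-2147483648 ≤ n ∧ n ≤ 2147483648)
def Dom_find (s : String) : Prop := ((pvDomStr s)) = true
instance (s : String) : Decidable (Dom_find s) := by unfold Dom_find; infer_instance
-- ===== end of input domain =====

-- B replaces A's backward two-stack deletion loop with the standard forward single-pass
-- stack, and replaces the find/rfind three-branch reinsertion by one direct scan for the
-- insertion index (idiomatic; same results).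

-- ===== PORT A =====
-- A's while-loop.  leftStack/rightStack are Python lists popped/appended at the END;
-- here both are kept top-first (head = Python's last element), so
-- leftStack[-2:] == ['1','1'] becomes L1.take 2 = ['1','1'] (symmetric pair) and the
-- final ''.join(rightStack[-1::-1]) is the rep list itself.
def pvLoopA : List Char → List Char → Nat → List Char × Nat
  | [], r, c => (r, c)
  | v :: l1, r, c =>
    if h : v = '0' ∧ l1.take 2 = ['1', '1'] then
      -- leftStack.pop(); leftStack.pop(); count += 1; move back up to two rightStack chars
      match r with
      | r1 :: r2 :: r' => pvLoopA (r2 :: r1 :: l1.drop 2) r' (c + 1)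
      | [r1] => pvLoopA (r1 :: l1.drop 2) [] (c + 1)
      | [] => pvLoopA (l1.drop 2) [] (c + 1)
    else
      pvLoopA l1 (v :: r) c
  termination_by l r c => 2 * l.length + r.length
  decreasing_by
    all_goals try (have hlen := congrArg List.length h.2; simp at hlen)
    all_goals simp
    all_goals omega

-- the reinsertion block of A:  m = '110'*count; the three-way branch on the reduced string
def pvReinsertA (t : List Char) (count : Nat) : List Char :=
  let m := (List.replicate count (['1', '1', '0'] : List Char)).flatten
  if t = ['1'] then m ++ t
  else if PySem.Chars.find t ['1', '1'] ≠ -1 then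
    let i := PySem.Chars.find t ['1', '1']
    PySem.List.slice t none (some i) ++ m ++ PySem.List.slice t (some i) none
  else
    let i := PySem.Chars.rfind t ['0']
    PySem.List.slice t none (some (i + 1)) ++ m ++ PySem.List.slice t (some (i + 1)) none

def find (s : String) : String :=
  let r := pvLoopA s.toList.reverse [] 0
  String.mk (pvReinsertA r.1 r.2)

-- ===== PORT B =====
-- B's forward pass:  for ch in s: stack.append(ch); if stack[-3:]==['1','1','0']: del, count+=1.
-- The stack is kept top-first (head = Python's stack[-1]), so stack[-3:] == ['1','1','0']
-- becomes st'.take 3 = ['0','1','1'] and ''.join(stack) is st.reverse.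
def pvLoopB : List Char → List Char → Nat → List Char × Nat
  | [], st, c => (st, c)
  | ch :: rest, st, c =>
    let st' := ch :: st
    if st'.take 3 = ['0', '1', '1'] then pvLoopB rest (st'.drop 3) (c + 1)
    else pvLoopB rest st' c

-- Source B's index scan:  for j in range(len(t)): first '11' wins, else remember the last '0';
-- after the loop the answer is last0 + 1.  Here the list is consumed structurally while j
-- counts the absolute index and last0 carries the Python variable (t[j+1] check = head? of
-- the remaining list).
def pvInsAux : List Char → Nat → Int → Int
  | [], _, last0 => last0 + 1
  | c :: rest, j, last0 =>
    if c = '1' ∧ rest.head? = some '1' then (j : Int)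
    else pvInsAux rest (j + 1) (if c = '0' then (j : Int) else last0)

def find_alt (s : String) : String :=
  let r := pvLoopB s.toList [] 0
  let t := r.1.reverse
  let i := pvInsAux t 0 (-1)
  String.mk (PySem.List.slice t none (some i)
    ++ (List.replicate r.2 (['1', '1', '0'] : List Char)).flatten
    ++ PySem.List.slice t (some i) none)

-- ===== PRECONDITION & SPEC =====
def Spec_find (s : String) (out : String) : Prop := out = find_alt s
instance (s : String) (out : String) : Decidable (Spec_find s out) := by unfold Spec_find; infer_instance

-- ===== CLAIM (what is proved, stated in full; the proofs are below) =====
def Claim_equal_find : Prop := ∀ (s : String), Dom_find s → Spec_find s (find s)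

-- ===== LEMMAS AND PROOFS =====

-- one deletion of the three-character factor
def Red (a b : List Char) : Prop :=
  ∃ x y, a = x ++ ['1', '1', '0'] ++ y ∧ b = x ++ y

-- factor-free (normal form of the deletion rewrite)
def NF (l : List Char) : Prop := ¬ (['1', '1', '0'] <:+: l)

lemma red_length {a b : List Char} (h : Red a b) : a.length = b.length + 3 := by
  obtain ⟨x, y, rfl, rfl⟩ := h; simp; omega

lemma nf_no_red {u w : List Char} (h : NF u) (hw : Red u w) : False := by
  obtain ⟨x, y, rfl, -⟩ := hw
  exact h ⟨x, y, by simp⟩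

lemma nf_mono {l m : List Char} (h : NF l) (hm : m <:+: l) : NF m :=
  fun ht => h (ht.trans hm)

-- the factor does not overlap itself
lemma key_overlap (t y v : List Char)
    (h : ['1', '1', '0'] ++ y = t ++ ['1', '1', '0'] ++ v) :
    (t = [] ∧ y = v) ∨ ∃ w, t = ['1', '1', '0'] ++ w ∧ y = w ++ ['1', '1', '0'] ++ v := by
  match t with
  | [] => simp at h; exact Or.inl ⟨rfl, h⟩
  | [a] => simp at h
  | [a, b] => simp at h
  | a :: b :: c :: t' =>
    simp at h
    obtain ⟨ha, hb, hcc, hy⟩ := h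
    exact Or.inr ⟨t', by simp [← ha, ← hb, ← hcc], by simpa using hy⟩

lemma red_local {a b c : List Char} (hb : Red a b) (hc : Red a c) :
    b = c ∨ ∃ d, Red b d ∧ Red c d := by
  obtain ⟨x, y, rfl, rfl⟩ := hb
  obtain ⟨u, v, huv, rfl⟩ := hc
  rw [List.append_assoc, List.append_assoc] at huv
  rcases List.append_eq_append_iff.mp huv with ⟨t, rfl, ht⟩ | ⟨t, rfl, ht⟩
  · rw [← List.append_assoc] at ht
    rcases key_overlap t y v ht with ⟨rfl, rfl⟩ | ⟨w, rfl, rfl⟩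
    · exact Or.inl (by simp)
    · exact Or.inr ⟨x ++ w ++ v,
        ⟨x ++ w, v, by simp, by simp⟩,
        ⟨x, w ++ v, by simp, by simp⟩⟩
  · rw [← List.append_assoc] at ht
    rcases key_overlap t v y ht with ⟨rfl, rfl⟩ | ⟨w, rfl, rfl⟩
    · exact Or.inl (by simp)
    · exact Or.inr ⟨u ++ w ++ y,
        ⟨u, w ++ y, by simp, by simp⟩,
        ⟨u ++ w, y, by simp, by simp⟩⟩

lemma red_confluent : ∀ (n : Nat) (a b c : List Char), a.length ≤ n →
    Relation.ReflTransGen Red a b → Relation.ReflTransGen Red a c →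
    ∃ d, Relation.ReflTransGen Red b d ∧ Relation.ReflTransGen Red c d := by
  intro n
  induction n with
  | zero =>
    intro a b c hn hab hac
    rcases hab.cases_head with rfl | ⟨b1, hb1, -⟩
    · exact ⟨c, hac, .refl⟩
    · have := red_length hb1; omega
  | succ n ih =>
    intro a b c hn hab hac
    rcases hab.cases_head with rfl | ⟨b1, hb1, hb1b⟩
    · exact ⟨c, hac, .refl⟩
    rcases hac.cases_head with rfl | ⟨c1, hc1, hc1c⟩
    · exact ⟨b, .refl, hab⟩
    have hlb : b1.length ≤ n := by have := red_length hb1; omega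
    have hlc : c1.length ≤ n := by have := red_length hc1; omega
    rcases red_local hb1 hc1 with rfl | ⟨e, hbe, hce⟩
    · exact ih b1 b c hlb hb1b hc1c
    · obtain ⟨f, hbf, hef⟩ := ih b1 b e hlb hb1b (.single hbe)
      obtain ⟨g, hcg, hfg⟩ := ih c1 c f hlc hc1c ((Relation.ReflTransGen.single hce).trans hef)
      exact ⟨g, hbf.trans hfg, hcg⟩

lemma unique_nf {a u v : List Char}
    (hu : Relation.ReflTransGen Red a u) (hv : Relation.ReflTransGen Red a v)
    (hnu : NF u) (hnv : NF v) : u = v := by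
  obtain ⟨d, hud, hvd⟩ := red_confluent a.length a u v le_rfl hu hv
  have h1 : u = d := by
    rcases hud.cases_head with rfl | ⟨w, hw, -⟩
    · rfl
    · exact absurd hw (fun hw => nf_no_red hnu hw)
  have h2 : v = d := by
    rcases hvd.cases_head with rfl | ⟨w, hw, -⟩
    · rfl
    · exact absurd hw (fun hw => nf_no_red hnv hw)
  rw [h1, h2]

lemma nf_snoc (st : List Char) (ch : Char) (h1 : NF st.reverse)
    (h2 : ¬ (ch :: st).take 3 = ['0', '1', '1']) : NF ((ch :: st).reverse) := by
  intro hT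
  have hrev : ['0', '1', '1'] <:+: ch :: st := by
    have := hT.reverse; simpa using this
  rcases List.infix_cons_iff.mp hrev with hpre | hinf
  · obtain ⟨t, ht⟩ := hpre
    apply h2; rw [← ht]; simp
  · exact h1 (by simpa using hinf.reverse)

lemma loopB_spec : ∀ (rest st : List Char) (c : Nat), NF st.reverse →
    Relation.ReflTransGen Red (st.reverse ++ rest) ((pvLoopB rest st c).1).reverse ∧
    NF ((pvLoopB rest st c).1).reverse ∧
    (pvLoopB rest st c).2 * 3 + (pvLoopB rest st c).1.length = c * 3 + st.length + rest.length := by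
  intro rest
  induction rest with
  | nil =>
    intro st c h
    simp only [pvLoopB, List.append_nil]
    exact ⟨.refl, h, by simp⟩
  | cons ch rest ih =>
    intro st c h
    by_cases hcond : ch = '0' ∧ st.take 2 = ['1', '1']
    · obtain ⟨rfl, htake⟩ := hcond
      rcases st with _ | ⟨a, _ | ⟨b, st2⟩⟩ <;> simp at htake
      obtain ⟨rfl, rfl⟩ := htake
      have hstep : pvLoopB ('0' :: rest) ('1' :: '1' :: st2) c = pvLoopB rest st2 (c + 1) := by
        simp [pvLoopB]
      rw [hstep]
      have hnf2 : NF st2.reverse := nf_mono h ⟨[], ['1', '1'], by simp⟩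
      obtain ⟨hs, hn, hl⟩ := ih st2 (c + 1) hnf2
      refine ⟨?_, hn, by simp at hl ⊢; omega⟩
      have hred : Red (('1' :: '1' :: st2).reverse ++ '0' :: rest) (st2.reverse ++ rest) :=
        ⟨st2.reverse, rest, by simp, rfl⟩
      exact Relation.ReflTransGen.head hred hs
    · have hc3 : ¬ ((ch :: st).take 3 = ['0', '1', '1']) := by simpa using hcond
      have hstep : pvLoopB (ch :: rest) st c = pvLoopB rest (ch :: st) c := by
        simp only [pvLoopB, if_neg hc3]
      rw [hstep]
      obtain ⟨hs, hn, hl⟩ := ih (ch :: st) c (nf_snoc st ch h hc3)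
      refine ⟨?_, hn, by simp at hl ⊢; omega⟩
      have heq : st.reverse ++ ch :: rest = (ch :: st).reverse ++ rest := by simp
      rw [heq]; exact hs

lemma loopA_spec : ∀ (L R : List Char) (c : Nat),
    NF R →
    (∀ t L' r0 r1 R', L = t :: L' → R = r0 :: r1 :: R' → ¬(t = '1' ∧ r0 = '1' ∧ r1 = '0')) →
    (∀ t0 t1 L' r0 R', L = t0 :: t1 :: L' → R = r0 :: R' → ¬(t1 = '1' ∧ t0 = '1' ∧ r0 = '0')) →
    Relation.ReflTransGen Red (L.reverse ++ R) (pvLoopA L R c).1 ∧ NF (pvLoopA L R c).1 ∧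
    (pvLoopA L R c).2 * 3 + (pvLoopA L R c).1.length = c * 3 + L.length + R.length := by
  intro L R c
  induction L, R, c using pvLoopA.induct with
  | case1 r c =>
    intro hNF _ _
    simp only [pvLoopA]
    refine ⟨?_, hNF, by simp⟩
    rw [List.reverse_nil, List.nil_append]
  | case2 v l1 c h r1 r2 r' ih =>
    intro hNF hC1 hC2
    obtain ⟨rfl, htake⟩ := h
    rcases l1 with _ | ⟨a, _ | ⟨b, l2⟩⟩ <;> simp at htake
    obtain ⟨rfl, rfl⟩ := htake
    simp only [List.drop_succ_cons, List.drop_zero] at ih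
    have hstep : pvLoopA ('0' :: '1' :: '1' :: l2) (r1 :: r2 :: r') c
        = pvLoopA (r2 :: r1 :: l2) r' (c + 1) := by
      simp [pvLoopA]
    rw [hstep]
    have hNF' : NF r' := nf_mono hNF ⟨[r1, r2], [], by simp⟩
    have hC1' : ∀ t L' r0 r1'' R'', (r2 :: r1 :: l2) = t :: L' → r' = r0 :: r1'' :: R'' →
        ¬(t = '1' ∧ r0 = '1' ∧ r1'' = '0') := by
      rintro t L' r0 r1'' R'' h1 h2 ⟨ht, hr0, hr1⟩
      cases h1; subst h2
      exact hNF ⟨[r1], R'', by simp [ht, hr0, hr1]⟩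
    have hC2' : ∀ t0 t1 L' r0 R'', (r2 :: r1 :: l2) = t0 :: t1 :: L' → r' = r0 :: R'' →
        ¬(t1 = '1' ∧ t0 = '1' ∧ r0 = '0') := by
      rintro t0 t1 L' r0 R'' h1 h2 ⟨ht1, ht0, hr0⟩
      cases h1; subst h2
      exact hNF ⟨[], R'', by simp [ht1, ht0, hr0]⟩
    obtain ⟨hs, hn, hl⟩ := ih hNF' hC1' hC2'
    refine ⟨?_, hn, by simp at hl ⊢; omega⟩
    have hred : Red (('0' :: '1' :: '1' :: l2).reverse ++ (r1 :: r2 :: r'))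
        ((r2 :: r1 :: l2).reverse ++ r') :=
      ⟨l2.reverse, r1 :: r2 :: r', by simp, by simp⟩
    exact Relation.ReflTransGen.head hred hs
  | case3 v l1 c h r1 ih =>
    intro hNF hC1 hC2
    obtain ⟨rfl, htake⟩ := h
    rcases l1 with _ | ⟨a, _ | ⟨b, l2⟩⟩ <;> simp at htake
    obtain ⟨rfl, rfl⟩ := htake
    simp only [List.drop_succ_cons, List.drop_zero] at ih
    have hstep : pvLoopA ('0' :: '1' :: '1' :: l2) [r1] c = pvLoopA (r1 :: l2) [] (c + 1) := by
      simp [pvLoopA]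
    rw [hstep]
    have hC1' : ∀ t L' r0 r1'' R'', (r1 :: l2) = t :: L' → ([] : List Char) = r0 :: r1'' :: R'' →
        ¬(t = '1' ∧ r0 = '1' ∧ r1'' = '0') := by
      rintro t L' r0 r1'' R'' _ h2 _; simp at h2
    have hC2' : ∀ t0 t1 L' r0 R'', (r1 :: l2) = t0 :: t1 :: L' → ([] : List Char) = r0 :: R'' →
        ¬(t1 = '1' ∧ t0 = '1' ∧ r0 = '0') := by
      rintro t0 t1 L' r0 R'' _ h2 _; simp at h2
    obtain ⟨hs, hn, hl⟩ := ih (by simp [NF]) hC1' hC2'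
    refine ⟨?_, hn, by simp at hl ⊢; omega⟩
    have hred : Red (('0' :: '1' :: '1' :: l2).reverse ++ [r1]) ((r1 :: l2).reverse ++ []) :=
      ⟨l2.reverse, [r1], by simp, by simp⟩
    exact Relation.ReflTransGen.head hred hs
  | case4 v l1 c h ih =>
    intro hNF hC1 hC2
    obtain ⟨rfl, htake⟩ := h
    rcases l1 with _ | ⟨a, _ | ⟨b, l2⟩⟩ <;> simp at htake
    obtain ⟨rfl, rfl⟩ := htake
    simp only [List.drop_succ_cons, List.drop_zero] at ih
    have hstep : pvLoopA ('0' :: '1' :: '1' :: l2) [] c = pvLoopA l2 [] (c + 1) := by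
      simp [pvLoopA]
    rw [hstep]
    have hC1' : ∀ t L' r0 r1'' R'', l2 = t :: L' → ([] : List Char) = r0 :: r1'' :: R'' →
        ¬(t = '1' ∧ r0 = '1' ∧ r1'' = '0') := by
      rintro t L' r0 r1'' R'' _ h2 _; simp at h2
    have hC2' : ∀ t0 t1 L' r0 R'', l2 = t0 :: t1 :: L' → ([] : List Char) = r0 :: R'' →
        ¬(t1 = '1' ∧ t0 = '1' ∧ r0 = '0') := by
      rintro t0 t1 L' r0 R'' _ h2 _; simp at h2
    obtain ⟨hs, hn, hl⟩ := ih (by simp [NF]) hC1' hC2'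
    refine ⟨?_, hn, by simp at hl ⊢; omega⟩
    have hred : Red (('0' :: '1' :: '1' :: l2).reverse ++ []) (l2.reverse ++ []) :=
      ⟨l2.reverse, [], by simp, by simp⟩
    exact Relation.ReflTransGen.head hred hs
  | case5 v l1 r c h ih =>
    intro hNF hC1 hC2
    have hstep : pvLoopA (v :: l1) r c = pvLoopA l1 (v :: r) c := by
      rw [pvLoopA.eq_def]
      simp [h]
    rw [hstep]
    have hNF' : NF (v :: r) := by
      intro hT
      rcases List.infix_cons_iff.mp hT with hpre | hinf
      · obtain ⟨tl, htl⟩ := hpre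
        injection htl with hv hrest
        exact hC1 v l1 '1' '0' tl rfl hrest.symm ⟨hv.symm, rfl, rfl⟩
      · exact hNF hinf
    have hC1' : ∀ t L' r0 r1 R', l1 = t :: L' → v :: r = r0 :: r1 :: R' →
        ¬(t = '1' ∧ r0 = '1' ∧ r1 = '0') := by
      rintro t L' r0 r1 R' h1 h2 ⟨ht, hr0, hr1⟩
      injection h2 with hv hrest
      exact hC2 v t L' r1 R' (by rw [h1]) hrest ⟨ht, hv.trans hr0, hr1⟩
    have hC2' : ∀ t0 t1 L' r0 R'', l1 = t0 :: t1 :: L' → v :: r = r0 :: R'' →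
        ¬(t1 = '1' ∧ t0 = '1' ∧ r0 = '0') := by
      rintro t0 t1 L' r0 R'' h1 h2 ⟨ht1, ht0, hr0⟩
      injection h2 with hv _
      exact h ⟨hv.trans hr0, by rw [h1]; simp [ht0, ht1]⟩
    obtain ⟨hs, hn, hl⟩ := ih hNF' hC1' hC2'
    refine ⟨?_, hn, by simp at hl ⊢; omega⟩
    have heq2 : (v :: l1).reverse ++ r = l1.reverse ++ (v :: r) := by simp
    rw [heq2]; exact hs

-- ===== the reinsertion side: pvInsAux vs find/rfind =====

lemma single_pref_iff (l : List Char) (n : Nat) :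
    (['0'] <+: l.drop n) ↔ l[n]? = some '0' := by
  constructor
  · rintro ⟨t, ht⟩
    have : (l.drop n).head? = some '0' := by rw [← ht]; simp
    simpa [List.head?_drop] using this
  · intro h
    have hh : (l.drop n).head? = some '0' := by simpa [List.head?_drop] using h
    cases hd : l.drop n with
    | nil => rw [hd] at hh; simp at hh
    | cons a t =>
      rw [hd] at hh
      simp at hh
      subst hh
      exact ⟨t, rfl⟩

lemma two_pref_iff (c : Char) (r : List Char) :
    (['1', '1'] <+: c :: r) ↔ (c = '1' ∧ r.head? = some '1') := by
  constructor
  · rintro ⟨t, ht⟩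
    injection ht with h1 h2
    refine ⟨h1.symm, ?_⟩; rw [← h2]; simp
  · rintro ⟨rfl, hh⟩
    rcases r with _ | ⟨a, t⟩ <;> simp at hh
    subst hh; exact ⟨t, rfl⟩

-- pvInsAux returns the absolute index of the FIRST '11'
lemma insAux_find : ∀ (t : List Char) (j : Nat) (last0 : Int) (n : Nat),
    ['1', '1'] <+: t.drop n → (∀ m, m < n → ¬ ['1', '1'] <+: t.drop m) →
    pvInsAux t j last0 = (j : Int) + n := by
  intro t
  induction t with
  | nil => intro j last0 n h _; simp at h
  | cons c r ih =>
    intro j last0 n h hmin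
    by_cases hc : c = '1' ∧ r.head? = some '1'
    · have hn : n = 0 := by
        by_contra hn0
        exact hmin 0 (Nat.pos_of_ne_zero hn0) (by simpa using (two_pref_iff c r).mpr hc)
      subst hn
      simp [pvInsAux, hc]
    · have hn : n ≠ 0 := by
        intro h0; subst h0
        exact hc ((two_pref_iff c r).mp (by simpa using h))
      obtain ⟨n', rfl⟩ : ∃ n', n = n' + 1 := ⟨n - 1, by omega⟩
      have h' : ['1', '1'] <+: r.drop n' := by simpa using h
      have hmin' : ∀ m, m < n' → ¬ ['1', '1'] <+: r.drop m := by
        intro m hm hp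
        exact hmin (m + 1) (by omega) (by simpa using hp)
      rw [pvInsAux, if_neg hc, ih (j + 1) _ n' h' hmin']
      push_cast; ring

-- with no '11' and no '0', pvInsAux returns last0 + 1
lemma insAux_none : ∀ (t : List Char) (j : Nat) (last0 : Int),
    (∀ m, ¬ ['1', '1'] <+: t.drop m) → '0' ∉ t →
    pvInsAux t j last0 = last0 + 1 := by
  intro t
  induction t with
  | nil => intro j last0 _ _; simp [pvInsAux]
  | cons c r ih =>
    intro j last0 h11 h0
    have hc : ¬ (c = '1' ∧ r.head? = some '1') := by
      intro hc; exact h11 0 (by simpa using (two_pref_iff c r).mpr hc)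
    have hc0 : ¬ c = '0' := by intro h; exact h0 (by simp [h])
    rw [pvInsAux, if_neg hc, if_neg hc0]
    exact ih (j + 1) last0 (fun m hp => h11 (m + 1) (by simpa using hp)) (fun h => h0 (by simp [h]))

-- with no '11' and a LAST '0' at absolute index n, pvInsAux returns j + n + 1
lemma insAux_last0 : ∀ (t : List Char) (j : Nat) (last0 : Int) (n : Nat),
    (∀ m, ¬ ['1', '1'] <+: t.drop m) →
    t[n]? = some '0' → (∀ m, n < m → t[m]? ≠ some '0') →
    pvInsAux t j last0 = (j : Int) + n + 1 := by
  intro t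
  induction t with
  | nil => intro j last0 n _ h _; simp at h
  | cons c r ih =>
    intro j last0 n h11 hn hmax
    have hc : ¬ (c = '1' ∧ r.head? = some '1') := by
      intro hc; exact h11 0 (by simpa using (two_pref_iff c r).mpr hc)
    rw [pvInsAux, if_neg hc]
    have h11' : ∀ m, ¬ ['1', '1'] <+: r.drop m := fun m hp => h11 (m + 1) (by simpa using hp)
    rcases Nat.eq_zero_or_pos n with rfl | hpos
    · -- c is the last '0'; r has none
      have hc0 : c = '0' := by simpa using hn
      have h0r : '0' ∉ r := by
        intro hmem
        obtain ⟨m, hm, hget⟩ := List.getElem_of_mem hmem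
        exact hmax (m + 1) (by omega) (by simp [List.getElem?_eq_getElem hm, hget])
      rw [if_pos hc0, insAux_none r (j + 1) _ h11' h0r]
      push_cast; ring
    · obtain ⟨n', rfl⟩ : ∃ n', n = n' + 1 := ⟨n - 1, by omega⟩
      have hn' : r[n']? = some '0' := by simpa using hn
      have hmax' : ∀ m, n' < m → r[m]? ≠ some '0' := by
        intro m hm hget
        exact hmax (m + 1) (by omega) (by simpa using hget)
      rw [ih (j + 1) _ n' h11' hn' hmax']
      push_cast; ring

-- rfind.go unfolded, step by step
lemma rfind_go_zero (s sub : List Char) :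
    PySem.Chars.rfind.go s sub 0 = if sub.isPrefixOf s then 0 else -1 := rfl

lemma rfind_go_succ (s sub : List Char) (j : Nat) :
    PySem.Chars.rfind.go s sub (j + 1)
      = if sub.isPrefixOf (s.drop (j + 1)) then ((j + 1 : Nat) : Int)
        else PySem.Chars.rfind.go s sub j := rfl

-- rfind.go on a single-char pattern: no '0' anywhere → -1
lemma rfind_go_none (s : List Char) (h : ∀ k : Nat, s[k]? ≠ some '0') :
    ∀ j, PySem.Chars.rfind.go s ['0'] j = -1 := by
  intro j
  induction j with
  | zero =>
    rw [rfind_go_zero, if_neg]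
    intro hp
    have h1 : ['0'] <+: s.drop 0 := by simpa using List.isPrefixOf_iff_prefix.mp hp
    exact h 0 ((single_pref_iff s 0).mp h1)
  | succ j ih =>
    rw [rfind_go_succ, if_neg, ih]
    intro hp
    exact h (j + 1) ((single_pref_iff s (j + 1)).mp (List.isPrefixOf_iff_prefix.mp hp))

-- rfind.go finds the HIGHEST index of '0' below the counter
lemma rfind_go_last (s : List Char) (n : Nat)
    (hn : s[n]? = some '0') (hmax : ∀ m, n < m → s[m]? ≠ some '0') :
    ∀ j, n ≤ j → PySem.Chars.rfind.go s ['0'] j = (n : Int) := by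
  intro j
  induction j with
  | zero =>
    intro hj
    have h0 : n = 0 := Nat.le_zero.mp hj
    subst h0
    rw [rfind_go_zero,
      if_pos (List.isPrefixOf_iff_prefix.mpr (by simpa using (single_pref_iff s 0).mpr hn))]
    simp
  | succ j ih =>
    intro hj
    rcases Nat.lt_or_ge n (j + 1) with hlt | hge
    · rw [rfind_go_succ, if_neg, ih (by omega)]
      intro hp
      exact hmax (j + 1) hlt ((single_pref_iff s (j + 1)).mp (List.isPrefixOf_iff_prefix.mp hp))
    · have h1 : n = j + 1 := by omega
      subst h1
      rw [rfind_go_succ,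
        if_pos (List.isPrefixOf_iff_prefix.mpr ((single_pref_iff s (j + 1)).mpr hn))]

-- no '11' anywhere as a prefix of a drop ↔ find = -1
lemma no11_of_find_neg (t : List Char) (h : PySem.Chars.find t ['1', '1'] = -1) :
    ∀ m, ¬ ['1', '1'] <+: t.drop m := by
  intro m hp
  have hinf : ['1', '1'] <:+: t :=
    (PySem.Chars.isIn_iff_infix ['1', '1'] t).mp
      ((PySem.Chars.exists_prefix_drop_iff_isIn ['1', '1'] t).mp ⟨m, hp⟩)
  exact (PySem.Chars.find_eq_neg_one_iff t ['1', '1']).mp h hinf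

-- the reduced string and count determine both reinsertion results equally
lemma reinsert_eq (t : List Char) (cnt : Nat) :
    pvReinsertA t cnt =
      PySem.List.slice t none (some (pvInsAux t 0 (-1)))
        ++ (List.replicate cnt (['1', '1', '0'] : List Char)).flatten
        ++ PySem.List.slice t (some (pvInsAux t 0 (-1))) none := by
  unfold pvReinsertA
  by_cases h1 : t = ['1']
  · subst h1
    have hi : pvInsAux ['1'] 0 (-1) = 0 := by decide
    rw [hi]
    have hs1 : PySem.List.slice ['1'] none (some 0) = ([] : List Char) := by decide
    have hs2 : PySem.List.slice ['1'] (some 0) none = (['1'] : List Char) := by decide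
    simp [hs1, hs2]
  · rw [if_neg h1]
    by_cases h2 : PySem.Chars.find t ['1', '1'] ≠ -1
    · rw [if_pos h2]
      have hpos : 0 ≤ PySem.Chars.find t ['1', '1'] :=
        (PySem.Chars.find_nonneg_iff t ['1', '1']).mpr
          ((PySem.Chars.find_ne_neg_one_iff t ['1', '1']).mp h2)
      obtain ⟨hpref, hmin⟩ := PySem.Chars.find_spec hpos
      have hins : pvInsAux t 0 (-1) = PySem.Chars.find t ['1', '1'] := by
        rw [insAux_find t 0 (-1) (PySem.Chars.find t ['1', '1']).toNat hpref hmin]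
        omega
      rw [hins]
    · rw [if_neg h2]
      have h2' : PySem.Chars.find t ['1', '1'] = -1 := not_not.mp h2
      have h11 := no11_of_find_neg t h2'
      by_cases h0 : '0' ∈ t
      · -- there is a last '0'
        obtain ⟨k, hk, hget⟩ := List.getElem_of_mem h0
        have hNp : t[Nat.findGreatest (fun n => t[n]? = some '0') t.length]? = some '0' :=
          Nat.findGreatest_spec (P := fun n => t[n]? = some '0') (le_of_lt hk)
            (by simp [List.getElem?_eq_getElem hk, hget])
        have hNmax : ∀ m, Nat.findGreatest (fun n => t[n]? = some '0') t.length < m →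
            t[m]? ≠ some '0' := by
          intro m hm hgm
          have hml : m < t.length := (List.getElem?_eq_some_iff.mp hgm).1
          exact absurd (Nat.le_findGreatest (P := fun n => t[n]? = some '0') (le_of_lt hml) hgm) (by omega)
        have hrf : PySem.Chars.rfind t ['0']
            = ((Nat.findGreatest (fun n => t[n]? = some '0') t.length : Nat) : Int) := by
          show PySem.Chars.rfind.go t ['0'] t.length = _
          exact rfind_go_last t _ hNp hNmax t.length (Nat.findGreatest_le t.length)
        have hins : pvInsAux t 0 (-1) = PySem.Chars.rfind t ['0'] + 1 := by
          rw [insAux_last0 t 0 (-1) _ h11 hNp hNmax, hrf]; ring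
        rw [hins]
      · -- no '0' at all
        have hng : ∀ k : Nat, t[k]? ≠ some '0' := by
          intro k hk
          exact h0 (List.mem_of_getElem? hk)
        have hrf : PySem.Chars.rfind t ['0'] = -1 := by
          show PySem.Chars.rfind.go t ['0'] t.length = -1
          exact rfind_go_none t hng t.length
        have hins : pvInsAux t 0 (-1) = PySem.Chars.rfind t ['0'] + 1 := by
          rw [insAux_none t 0 (-1) h11 h0, hrf]
        rw [hins]

-- ===== VERDICT (by name: the statement is the Claim_ definition above) =====
theorem find_spec : Claim_equal_find := by
  unfold Claim_equal_find Spec_find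
  intro s _
  obtain ⟨hsA, hnA, hlA⟩ :=
    loopA_spec s.toList.reverse [] 0 (by simp [NF])
      (by rintro t L' r0 r1 R' _ h2; simp at h2)
      (by rintro t0 t1 L' r0 R' _ h2; simp at h2)
  obtain ⟨hsB, hnB, hlB⟩ := loopB_spec s.toList [] 0 (by simp [NF])
  rw [List.reverse_reverse, List.append_nil] at hsA
  rw [List.reverse_nil, List.nil_append] at hsB
  have heq : (pvLoopA s.toList.reverse [] 0).1 = (pvLoopB s.toList [] 0).1.reverse :=
    unique_nf hsA hsB hnA hnB
  have hlen := congrArg List.length heq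
  simp at hlA hlB hlen
  have hc : (pvLoopA s.toList.reverse [] 0).2 = (pvLoopB s.toList [] 0).2 := by omega
  simp only [find, find_alt]
  rw [heq, hc, reinsert_eq]
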